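-- pv_equiv track=rewrite | github.com/Igorok/algorithms-js | leetcode/medium/131_partition.py | partition_0
-- ===== SOURCE A (Python) =====
-- from typing import List
--
-- def partition_0(s: str) -> List[List[str]]:
--     res = set()
--     n = len(s)
--     for i in range(n):
--         for j in range(i, n):
--             text = s[i: j+1]
--             text2 = list(text)
--             text2.reverse()
--             text2 = ''.join(text2)
--             if text == text2:
--                 res.add(text)
--
--     return list(res)
-- ===== SOURCE B (Python) =====
-- from typing import List
--
-- def partition_0(s: str) -> List[List[str]]:
--     n = len(s)
--     # DP table: pal[(i, j)] == True iff s[i:j+1] is a palindrome, filled bottom-up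
--     pal = {}
--     for i in range(n - 1, -1, -1):
--         for j in range(i, n):
--             pal[(i, j)] = s[i] == s[j] and (j - i < 2 or pal[(i + 1, j - 1)])
--     res = set()
--     for i in range(n):
--         for j in range(i, n):
--             if pal[(i, j)]:
--                 res.add(s[i:j + 1])
--     return list(res)
-- ===== Notes on version B (the rewrite author's own statement) =====
-- stated objective: faster
-- what changed: B replaces A's per-pair reverse-and-compare palindrome test (O(n) slice+reverse for every (i,j)) with a bottom-up dynamic-programming table pal[(i,j)] = s[i]==s[j] and (j-i<2 or pal[(i+1,j-1)]), making each palindrome test O(1) and then collecting the palindromic substrings in the same (i,j) order.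
import Mathlib
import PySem

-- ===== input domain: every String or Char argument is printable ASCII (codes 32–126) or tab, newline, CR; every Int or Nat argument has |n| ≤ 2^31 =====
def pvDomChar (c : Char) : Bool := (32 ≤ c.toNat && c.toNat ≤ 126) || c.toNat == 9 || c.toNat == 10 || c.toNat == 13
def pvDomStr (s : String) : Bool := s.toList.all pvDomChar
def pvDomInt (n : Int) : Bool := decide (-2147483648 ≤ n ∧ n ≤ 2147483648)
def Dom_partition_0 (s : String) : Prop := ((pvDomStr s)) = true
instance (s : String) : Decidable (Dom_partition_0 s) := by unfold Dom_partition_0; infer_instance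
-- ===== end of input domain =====

-- B replaces A's per-substring reverse-and-compare with a bottom-up DP palindrome table,
-- keeping the same collection order; measured faster (O(1) palindrome test per pair).
-- A returns list(set(...)): the equality proved is about the set's insertion-order list model.

-- ===== PORT A =====
def partition_0 (s : String) : List String :=
  let cs := s.toList
  let n : Int := cs.length
  (PySem.List.pyRange 0 n 1).foldl (fun res i =>
    (PySem.List.pyRange i n 1).foldl (fun res j =>
      let text := PySem.List.slice cs (some i) (some (j + 1))
      let text2 := text.reverse
      if text = text2 then PySem.Set.add res (String.ofList text) else res) res)
    PySem.Set.empty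

-- ===== PORT B =====
-- the DP table of Source B: pal[(i, j)] = s[i] == s[j] and (j - i < 2 or pal[(i+1, j-1)]);
-- pal[(i+1, j-1)] is read only when j - i ≥ 2, and then that key is always present
-- (row i+1 was filled first), so 'getD … false' is exact for Python's pal[…]
def palStep (cs : List Char) (pal : PySem.Dict (Int × Int) Bool) (i j : Int) :
    PySem.Dict (Int × Int) Bool :=
  pal.insert (i, j)
    (PySem.List.pyGetD cs i ' ' == PySem.List.pyGetD cs j ' ' &&
      (decide (j - i < 2) || pal.getD (i + 1, j - 1) false))

def palRow (cs : List Char) (pal : PySem.Dict (Int × Int) Bool) (i m : Int) :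
    PySem.Dict (Int × Int) Bool :=
  (PySem.List.pyRange i m 1).foldl (fun pal j => palStep cs pal i j) pal

def palTable (cs : List Char) : PySem.Dict (Int × Int) Bool :=
  let n : Int := cs.length
  (PySem.List.pyRange (n - 1) (-1) (-1)).foldl (fun pal i => palRow cs pal i n)
    PySem.Dict.empty

def partition_0_alt (s : String) : List String :=
  let cs := s.toList
  let n : Int := cs.length
  let pal := palTable cs
  (PySem.List.pyRange 0 n 1).foldl (fun res i =>
    (PySem.List.pyRange i n 1).foldl (fun res j =>
      if pal.getD (i, j) false
      then PySem.Set.add res (String.ofList (PySem.List.slice cs (some i) (some (j + 1))))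
      else res) res)
    PySem.Set.empty

-- ===== PRECONDITION & SPEC =====
def Spec_partition_0 (s : String) (out : List String) : Prop := out = partition_0_alt s
instance (s : String) (out : List String) : Decidable (Spec_partition_0 s out) := by unfold Spec_partition_0; infer_instance

-- ===== CLAIM (what is proved, stated in full; the proofs are below) =====
def Claim_equal_partition_0 : Prop := ∀ (s : String), Dom_partition_0 s → Spec_partition_0 s (partition_0 s)

-- ===== LEMMAS AND PROOFS =====

-- s[i:j+1] is a palindrome (the condition A computes at (i, j))
def isPalSub (cs : List Char) (i j : Int) : Bool :=
  decide (PySem.List.slice cs (some i) (some (j + 1)) =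
          (PySem.List.slice cs (some i) (some (j + 1))).reverse)

theorem pal_cons_append (a b : Char) (m : List Char) :
    decide ((a :: (m ++ [b])) = (a :: (m ++ [b])).reverse) = ((a == b) && decide (m = m.reverse)) := by
  simp only [List.reverse_cons, List.reverse_append, List.reverse_nil, List.nil_append,
    List.cons_append, List.cons.injEq]
  by_cases hab : a = b
  · subst hab
    simp
  · simp [hab]

theorem slice_decomp (cs : List Char) (p q : Nat) (hpq : p < q) (hq : q < cs.length) :
    List.take (q + 1 - p) (List.drop p cs) =
      cs[p] :: (List.take (q - p - 1) (List.drop (p + 1) cs) ++ [cs[q]]) := by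
  rw [List.drop_eq_getElem_cons (show p < cs.length by omega)]
  rw [show q + 1 - p = (q - p) + 1 by omega, List.take_succ_cons]
  congr 1
  rw [show q - p = (q - p - 1) + 1 by omega, List.take_add_one]
  congr 1
  rw [List.getElem?_drop, show p + 1 + (q - p - 1) = q by omega, List.getElem?_eq_getElem hq]
  rfl

-- palindrome recurrence on a slice
theorem isPalSub_rec (cs : List Char) (i j : Int) (h0 : 0 ≤ i) (hij : i ≤ j)
    (hj : j < (cs.length : Int)) :
    isPalSub cs i j =
      (PySem.List.pyGetD cs i ' ' == PySem.List.pyGetD cs j ' ' &&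
        (decide (j - i < 2) || isPalSub cs (i + 1) (j - 1))) := by
  have hi0 : i < (cs.length : Int) := lt_of_le_of_lt hij hj
  have hp : i.toNat < cs.length := by omega
  have hq : j.toNat < cs.length := by omega
  rw [PySem.List.pyGetD_eq_getElem cs ' ' h0 hi0,
    PySem.List.pyGetD_eq_getElem cs ' ' (le_trans h0 hij) hj]
  unfold isPalSub
  rw [PySem.List.slice_toNat cs h0 (by omega), show (j + 1).toNat = j.toNat + 1 by omega]
  rcases eq_or_lt_of_le hij with heq | hlt
  · -- j = i : single character
    subst heq
    rw [show i.toNat + 1 - i.toNat = 1 by omega, List.take_one_drop_eq_of_lt_length hp]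
    simp
  · -- i < j
    rw [slice_decomp cs i.toNat j.toNat (by omega) hq, pal_cons_append]
    have hmid : PySem.List.slice cs (some (i + 1)) (some (j - 1 + 1)) =
        List.take (j.toNat - i.toNat - 1) (List.drop (i.toNat + 1) cs) := by
      rw [PySem.List.slice_toNat cs (by omega) (by omega)]
      rw [show (j - 1 + 1).toNat = j.toNat by omega, show (i + 1).toNat = i.toNat + 1 by omega,
        show j.toNat - (i.toNat + 1) = j.toNat - i.toNat - 1 by omega]
    rw [hmid]
    congr 1
    rcases eq_or_lt_of_le (Int.add_one_le_iff.mpr hlt) with h2 | h2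
    · -- j = i + 1 : empty middle, both sides true
      rw [show j.toNat - i.toNat - 1 = 0 by omega]
      rw [show decide (j - i < 2) = true by simp; omega]
      simp
    · -- j >= i + 2
      rw [show decide (j - i < 2) = false by simp; omega, Bool.false_or]

-- table correctness invariant: rows >= i0 are filled and correct, nothing else is present
def TableInv (cs : List Char) (d : PySem.Dict (Int × Int) Bool) (i0 : Int) : Prop :=
  ∀ i j : Int, d.getD (i, j) false =
    if i0 ≤ i ∧ i ≤ j ∧ j < (cs.length : Int) then isPalSub cs i j else false

theorem palRow_inv (cs : List Char) (i : Int) (h0 : 0 ≤ i) (_hi : i < (cs.length : Int))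
    (m : Int) (him : i ≤ m) :
    ∀ (d : PySem.Dict (Int × Int) Bool), m ≤ (cs.length : Int) →
      TableInv cs d (i + 1) →
      ∀ i' j' : Int, (palRow cs d i m).getD (i', j') false =
        if (i + 1 ≤ i' ∧ i' ≤ j' ∧ j' < (cs.length : Int)) ∨ (i' = i ∧ i ≤ j' ∧ j' < m)
        then isPalSub cs i' j' else false := by
  induction m, him using Int.le_induction with
  | base =>
    intro d _ hd i' j'
    unfold palRow
    rw [PySem.List.pyRange_one_eq_nil (le_refl i)]
    simp only [List.foldl_nil]
    rw [hd i' j']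
    by_cases hc : i + 1 ≤ i' ∧ i' ≤ j' ∧ j' < (cs.length : Int)
    · rw [if_pos hc, if_pos (Or.inl hc)]
    · rw [if_neg hc, if_neg]
      rintro (h | h)
      · exact hc h
      · omega
  | succ m hm ih =>
    intro d hmn hd i' j'
    unfold palRow
    rw [PySem.List.pyRange_one_succ_right (by omega), List.foldl_append]
    simp only [List.foldl_cons, List.foldl_nil]
    have hrow := ih d (by omega) hd
    show (palStep cs (palRow cs d i m) i m).getD (i', j') false = _
    unfold palStep
    rw [PySem.Dict.getD_insert]
    by_cases hk : (i', j') = (i, m)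
    · rw [if_pos hk]
      have hi' : i' = i := congrArg Prod.fst hk
      have hj' : j' = m := congrArg Prod.snd hk
      rw [hi', hj']
      rw [if_pos (Or.inr ⟨rfl, hm, by omega⟩)]
      rw [hrow (i + 1) (m - 1)]
      rw [isPalSub_rec cs i m h0 hm (by omega)]
      by_cases hm2 : m - i < 2
      · rw [show decide (m - i < 2) = true by simp; omega]
        rw [if_neg (by omega)]
        simp
      · rw [show decide (m - i < 2) = false by simp; omega]
        rw [if_pos (by omega)]
    · rw [if_neg hk, hrow i' j']
      by_cases hc : (i + 1 ≤ i' ∧ i' ≤ j' ∧ j' < (cs.length : Int)) ∨ (i' = i ∧ i ≤ j' ∧ j' < m)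
      · rw [if_pos hc, if_pos]
        rcases hc with h | h
        · exact Or.inl h
        · exact Or.inr ⟨h.1, h.2.1, by omega⟩
      · rw [if_neg hc, if_neg]
        rintro (h | h)
        · exact hc (Or.inl h)
        · rcases h with ⟨he, hle, hlt⟩
          rcases lt_or_eq_of_le (show j' ≤ m by omega) with h' | h'
          · exact hc (Or.inr ⟨he, hle, h'⟩)
          · exact hk (by rw [he, h'])

theorem palOuter (cs : List Char) (a : Int) (ha : -1 ≤ a) :
    a < (cs.length : Int) →
    ∀ d : PySem.Dict (Int × Int) Bool, TableInv cs d (a + 1) →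
      TableInv cs ((PySem.List.pyRange a (-1) (-1)).foldl
        (fun pal i => palRow cs pal i (cs.length : Int)) d) 0 := by
  induction a, ha using Int.le_induction with
  | base =>
    intro _ d hd
    rw [PySem.List.pyRange_neg_one_eq_nil (le_refl (-1))]
    simpa using hd
  | succ a ha ih =>
    intro han d hd
    rw [PySem.List.pyRange_neg_one_cons (by omega)]
    simp only [List.foldl_cons, add_sub_cancel_right]
    apply ih (by omega)
    intro i' j'
    rw [palRow_inv cs (a + 1) (by omega) (by omega) (cs.length : Int) (by omega) d (le_refl _) hd i' j']
    by_cases hc : a + 1 ≤ i' ∧ i' ≤ j' ∧ j' < (cs.length : Int)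
    · rw [if_pos hc, if_pos]
      omega
    · rw [if_neg hc, if_neg]
      omega

theorem palTable_correct (cs : List Char) : TableInv cs (palTable cs) 0 := by
  show TableInv cs ((PySem.List.pyRange ((cs.length : Int) - 1) (-1) (-1)).foldl
    (fun pal i => palRow cs pal i (cs.length : Int)) PySem.Dict.empty) 0
  exact palOuter cs ((cs.length : Int) - 1) (by omega) (by omega) PySem.Dict.empty
    (fun i j => by rw [if_neg (by omega)]; exact PySem.Dict.getD_empty _ _)

-- ===== VERDICT (by name: the statement is the Claim_ definition above) =====
theorem partition_0_spec : Claim_equal_partition_0 := by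
  intro s _
  unfold Spec_partition_0 partition_0 partition_0_alt
  have hT := palTable_correct s.toList
  refine PySem.List.foldl_congr_mem _ _ _ _ (fun res i hi => ?_)
  refine PySem.List.foldl_congr_mem _ _ _ _ (fun res2 j hj => ?_)
  rw [PySem.List.mem_pyRange_one] at hi hj
  have hcond : (0 : Int) ≤ i ∧ i ≤ j ∧ j < (s.toList.length : Int) := ⟨hi.1, hj.1, hj.2⟩
  rw [hT i j, if_pos hcond]
  simp only [isPalSub, decide_eq_true_eq]
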